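-- pv_equiv track=rewrite | github.com/AliAnsariArshad/LeetCode | Problems/Easy/String/ArraysStringsAreEqual.py | arrays_strings_are_equal2
-- ===== SOURCE A (Python) =====
-- from typing import List
--
-- def arrays_strings_are_equal2(word1: List[str], word2: List[str]) -> bool:
--     newword1 = ''.join(word1)
--     newword2 = ''.join(word2)
--
--     if len(newword1) != len(newword2):
--         return False
--
--     for i in range(len(newword1)):
--         if newword1[i] != newword2[i]:
--             return False
--     return True
-- ===== SOURCE B (Python) =====
-- from typing import List
--
-- def arrays_strings_are_equal2(word1: List[str], word2: List[str]) -> bool: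
--     # Compare the two character streams in lockstep without building the joined strings.
--     def chars(words):
--         for w in words:
--             yield from w
--     g1 = chars(word1)
--     g2 = chars(word2)
--     while True:
--         c1 = next(g1, None)
--         c2 = next(g2, None)
--         if c1 != c2:
--             return False
--         if c1 is None:
--             return True
-- ===== Notes on version B (the rewrite author's own statement) =====
-- stated objective: alternative
-- what changed: B streams characters from both lists in lockstep via generators and stops at the first mismatch, instead of materialising both joined strings and then index-comparing them.
import Mathlib
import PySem

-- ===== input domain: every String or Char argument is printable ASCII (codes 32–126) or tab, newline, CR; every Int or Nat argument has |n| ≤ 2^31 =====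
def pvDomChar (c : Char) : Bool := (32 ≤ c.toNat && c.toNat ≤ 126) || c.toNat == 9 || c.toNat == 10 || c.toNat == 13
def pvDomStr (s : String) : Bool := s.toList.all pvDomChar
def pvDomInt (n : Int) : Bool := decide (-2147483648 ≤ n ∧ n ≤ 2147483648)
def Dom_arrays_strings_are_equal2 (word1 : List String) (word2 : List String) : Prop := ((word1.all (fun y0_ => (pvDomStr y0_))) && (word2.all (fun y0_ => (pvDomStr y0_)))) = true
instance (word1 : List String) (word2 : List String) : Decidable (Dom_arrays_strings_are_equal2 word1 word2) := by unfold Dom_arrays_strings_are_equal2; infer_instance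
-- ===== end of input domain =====

-- B compares the two character streams in lockstep (cursor over fragments) and stops at the
-- first mismatch, instead of materialising both joined strings and index-comparing them
-- (objective: alternative decomposition, same cost).

-- ===== PORT A =====
-- ''.join(word1) as a list of characters
def pvJoinChars (ws : List String) : List Char := ws.flatMap String.toList

-- the 'for i in range(len(newword1)): if newword1[i] != newword2[i]: return False' loop
def pvLoopA (a b : List Char) : List Int → Bool
  | [] => true
  | i :: rest =>
    match PySem.List.pyGet? a i, PySem.List.pyGet? b i with
    | some x, some y => if x ≠ y then false else pvLoopA a b rest
    -- unreachable in A: i always lies in range(len(a)) and len(a) = len(b)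
    | _, _ => false

def arrays_strings_are_equal2 (word1 : List String) (word2 : List String) : Bool :=
  let newword1 := pvJoinChars word1
  let newword2 := pvJoinChars word2
  if newword1.length ≠ newword2.length then false
  else pvLoopA newword1 newword2 (PySem.List.pyRange 0 (newword1.length : Int) 1)

-- ===== PORT B =====
-- next(g, None) for the generator 'for w in words: yield from w':
-- the pending characters of the current fragment plus the remaining fragments
def pvNextChar : List Char → List String → Option (Char × List Char × List String)
  | c :: s, ws => some (c, s, ws)
  | [], [] => none
  | [], w :: ws => pvNextChar w.toList ws
termination_by _ ws => ws.length

def pvSz (s : List Char) (ws : List String) : Nat :=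
  s.length + (ws.map (fun w => w.toList.length)).sum

theorem pvNextChar_size {s : List Char} {ws : List String} {c : Char}
    {s' : List Char} {ws' : List String}
    (h : pvNextChar s ws = some (c, s', ws')) : pvSz s' ws' < pvSz s ws := by
  induction ws generalizing s with
  | nil =>
    cases s with
    | nil => simp [pvNextChar] at h
    | cons x t => simp [pvNextChar] at h; obtain ⟨h1, h2, h3⟩ := h; subst h2 h3; simp [pvSz]
  | cons w rest ih =>
    cases s with
    | nil =>
      have := ih (s := w.toList) (by simpa [pvNextChar] using h)
      simp [pvSz] at this ⊢; omega
    | cons x t => simp [pvNextChar] at h; obtain ⟨h1, h2, h3⟩ := h; subst h2 h3; simp [pvSz]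

-- the 'while True' lockstep loop of B
def pvRunB (s1 : List Char) (ws1 : List String) (s2 : List Char) (ws2 : List String) : Bool :=
  match h1 : pvNextChar s1 ws1, h2 : pvNextChar s2 ws2 with
  | none, none => true
  | some (c1, s1', ws1'), some (c2, s2', ws2') =>
    if c1 ≠ c2 then false else pvRunB s1' ws1' s2' ws2'
  | _, _ => false
termination_by pvSz s1 ws1
decreasing_by exact pvNextChar_size h1

def arrays_strings_are_equal2_alt (word1 : List String) (word2 : List String) : Bool :=
  pvRunB [] word1 [] word2

-- ===== PRECONDITION & SPEC =====
def Spec_arrays_strings_are_equal2 (word1 : List String) (word2 : List String) (out : Bool) : Prop := out = arrays_strings_are_equal2_alt word1 word2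
instance (word1 : List String) (word2 : List String) (out : Bool) : Decidable (Spec_arrays_strings_are_equal2 word1 word2 out) := by unfold Spec_arrays_strings_are_equal2; infer_instance

-- ===== CLAIM (what is proved, stated in full; the proofs are below) =====
def Claim_equal_arrays_strings_are_equal2 : Prop := ∀ (word1 : List String) (word2 : List String), Dom_arrays_strings_are_equal2 word1 word2 → Spec_arrays_strings_are_equal2 word1 word2 (arrays_strings_are_equal2 word1 word2)

-- ===== LEMMAS AND PROOFS =====

def pvStream (s : List Char) (ws : List String) : List Char := s ++ ws.flatMap String.toList

theorem pvNextChar_none {s : List Char} {ws : List String}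
    (h : pvNextChar s ws = none) : pvStream s ws = [] := by
  induction ws generalizing s with
  | nil => cases s with
    | nil => simp [pvStream]
    | cons x t => simp [pvNextChar] at h
  | cons w rest ih =>
    cases s with
    | nil =>
      have := ih (s := w.toList) (by simpa [pvNextChar] using h)
      simpa [pvStream] using this
    | cons x t => simp [pvNextChar] at h

theorem pvNextChar_some {s : List Char} {ws : List String} {c : Char}
    {s' : List Char} {ws' : List String}
    (h : pvNextChar s ws = some (c, s', ws')) :
    pvStream s ws = c :: pvStream s' ws' := by
  induction ws generalizing s with
  | nil => cases s with
    | nil => simp [pvNextChar] at h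
    | cons x t =>
      simp [pvNextChar] at h; obtain ⟨h1, h2, h3⟩ := h; subst h1 h2 h3; simp [pvStream]
  | cons w rest ih =>
    cases s with
    | nil =>
      have := ih (s := w.toList) (by simpa [pvNextChar] using h)
      simpa [pvStream] using this
    | cons x t =>
      simp [pvNextChar] at h; obtain ⟨h1, h2, h3⟩ := h; subst h1 h2 h3; simp [pvStream]

theorem pvRunB_eq (s1 : List Char) (ws1 : List String) (s2 : List Char) (ws2 : List String) :
    pvRunB s1 ws1 s2 ws2 = (pvStream s1 ws1 == pvStream s2 ws2) := by
  fun_induction pvRunB with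
  | case1 _ _ _ _ h1 h2 =>
    rw [pvNextChar_none h1, pvNextChar_none h2]; rfl
  | case2 _ _ _ _ c1 s1' ws1' c2 s2' ws2' h1 h2 hne =>
    rw [pvNextChar_some h1, pvNextChar_some h2]
    simp_all
  | case3 _ _ _ _ c1 s1' ws1' c2 s2' ws2' h1 h2 hne ih =>
    rw [pvNextChar_some h1, pvNextChar_some h2]
    simp_all
  | case4 s1 ws1 s2 ws2 h1 h2 =>
    cases k1 : pvNextChar s1 ws1 with
    | none =>
      cases k2 : pvNextChar s2 ws2 with
      | none => exact absurd (h1 k1 k2) (by simp)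
      | some p =>
        obtain ⟨c, s', ws'⟩ := p
        rw [pvNextChar_none k1, pvNextChar_some k2]; rfl
    | some p =>
      obtain ⟨c, s', ws'⟩ := p
      cases k2 : pvNextChar s2 ws2 with
      | none => rw [pvNextChar_some k1, pvNextChar_none k2]; rfl
      | some q =>
        obtain ⟨c2, s2', ws2'⟩ := q
        exact absurd (h2 c s' ws' c2 s2' ws2' k1 k2) (by simp)

theorem pvLoopA_all (a b : List Char) (l : List Int) :
    pvLoopA a b l = l.all (fun i =>
      match PySem.List.pyGet? a i, PySem.List.pyGet? b i with
      | some x, some y => x == y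
      | _, _ => false) := by
  induction l with
  | nil => rfl
  | cons i rest ih =>
    simp only [List.all_cons]
    cases ha : PySem.List.pyGet? a i <;> cases hb : PySem.List.pyGet? b i <;>
      simp only [pvLoopA, ha, hb, ih, Bool.false_and]
    split_ifs with hxy
    · simp [hxy]
    · simp at hxy; simp [hxy]

theorem pvA_eq_gen (a b : List Char) :
    (if a.length ≠ b.length then false
     else pvLoopA a b (PySem.List.pyRange 0 (a.length : Int) 1)) = (a == b) := by
  by_cases h : a.length = b.length
  · rw [if_neg (by omega), pvLoopA_all, Bool.eq_iff_iff]
    simp only [List.all_eq_true, beq_iff_eq]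
    constructor
    · intro hall
      apply List.ext_getElem h
      intro i hi1 hi2
      have hmem : (i : Int) ∈ PySem.List.pyRange 0 (a.length : Int) 1 := by
        rw [PySem.List.mem_pyRange_one]; omega
      have := hall _ hmem
      simp only [PySem.List.pyGet?_natCast] at this
      rw [List.getElem?_eq_getElem hi1, List.getElem?_eq_getElem hi2] at this
      simpa using this
    · intro heq i hmem
      subst heq
      rw [PySem.List.mem_pyRange_one] at hmem
      obtain ⟨h0, hlt⟩ := hmem
      obtain ⟨n, rfl⟩ := Int.eq_ofNat_of_zero_le h0
      have hn : n < a.length := by exact_mod_cast hlt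
      simp [PySem.List.pyGet?_natCast, List.getElem?_eq_getElem hn]
  · rw [if_pos (by omega)]
    symm
    rw [beq_eq_false_iff_ne]
    intro heq
    exact h (by rw [heq])

theorem pvA_eq (w1 w2 : List String) :
    arrays_strings_are_equal2 w1 w2 = (pvJoinChars w1 == pvJoinChars w2) := by
  simp only [arrays_strings_are_equal2]
  exact pvA_eq_gen _ _

theorem pvB_eq (w1 w2 : List String) :
    arrays_strings_are_equal2_alt w1 w2 = (pvJoinChars w1 == pvJoinChars w2) := by
  unfold arrays_strings_are_equal2_alt
  rw [pvRunB_eq]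
  rfl

-- ===== VERDICT (by name: the statement is the Claim_ definition above) =====
theorem arrays_strings_are_equal2_spec : Claim_equal_arrays_strings_are_equal2 := by
  intro w1 w2 _
  unfold Spec_arrays_strings_are_equal2
  rw [pvA_eq, pvB_eq]
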